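-- pv_equiv track=rewrite | github.com/vindomestic-oss/m_a | lilypond/convert_ly_direct.py | _split_by_score
-- ===== SOURCE A (Python) =====
-- def _split_by_score(events: list) -> list[list]:
--     """Split event list at SCORE markers; returns one sub-list per score."""
--     groups: list[list] = []
--     cur: list = []
--     for ev in events:
--         if ev.get('t') == 'SCORE':
--             if cur:
--                 groups.append(cur)
--             cur = []
--         else:
--             cur.append(ev)
--     if cur:
--         groups.append(cur)
--     return groups if groups else [events]
-- ===== SOURCE B (Python) =====
-- def _split_by_score(events: list) -> list[list]:
--     """Split event list at SCORE markers; returns one sub-list per score."""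
--     groups: list[list] = []
--     rest = events
--     while rest:
--         if rest[0].get('t') == 'SCORE':
--             rest = rest[1:]
--         else:
--             k = 1
--             while k < len(rest) and rest[k].get('t') != 'SCORE':
--                 k += 1
--             groups.append(rest[:k])
--             rest = rest[k:]
--     return groups if groups else [events]
-- ===== Notes on version B (the rewrite author's own statement) =====
-- stated objective: alternative
-- what changed: Replaces A's accumulator fold (building a pending 'cur' list event by event and flushing it at markers) with a greedy segmentation: repeatedly skip SCORE markers and slice off the whole next maximal run of non-SCORE events in one step.
import Mathlib
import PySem

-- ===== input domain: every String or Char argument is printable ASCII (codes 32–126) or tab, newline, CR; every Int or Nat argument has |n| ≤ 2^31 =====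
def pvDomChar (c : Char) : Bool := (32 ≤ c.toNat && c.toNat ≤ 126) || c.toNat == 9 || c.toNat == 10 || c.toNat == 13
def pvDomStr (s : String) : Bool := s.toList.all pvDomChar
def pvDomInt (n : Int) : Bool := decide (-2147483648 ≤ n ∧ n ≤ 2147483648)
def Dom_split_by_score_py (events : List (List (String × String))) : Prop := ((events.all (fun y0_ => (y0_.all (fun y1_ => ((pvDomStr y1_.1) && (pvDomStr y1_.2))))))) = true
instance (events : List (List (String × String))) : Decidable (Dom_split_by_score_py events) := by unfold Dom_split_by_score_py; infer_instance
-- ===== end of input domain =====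

-- B replaces A's accumulator fold with greedy segmentation (skip markers, slice off each
-- maximal non-SCORE run at once): an alternative decomposition, same O(n) cost.

-- ===== PORT A =====

-- ev.get('t') == 'SCORE' : first-match lookup on the association list (exact for a dict)
def pvIsScore (ev : List (String × String)) : Bool := ev.lookup "t" == some "SCORE"

-- loop body: state = (groups, cur)
def pvStepA (st : List (List (List (String × String))) × List (List (String × String)))
    (ev : List (String × String)) :
    List (List (List (String × String))) × List (List (String × String)) :=
  if pvIsScore ev then
    (if st.2 ≠ [] then st.1 ++ [st.2] else st.1, [])
  else
    (st.1, st.2 ++ [ev])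

def split_by_score_py (events : List (List (String × String))) : List (List (List (String × String))) :=
  let st := events.foldl pvStepA ([], [])
  let groups := if st.2 ≠ [] then st.1 ++ [st.2] else st.1
  if groups ≠ [] then groups else [events]

-- ===== PORT B =====

-- the outer while-loop of Source B: skip a leading SCORE, else slice off the maximal
-- non-SCORE run rest[:k] (= head :: takeWhile) and continue on rest[k:] (= dropWhile)
def pvGoB (rest : List (List (String × String))) : List (List (List (String × String))) :=
  match rest with
  | [] => []
  | ev :: tl =>
    if pvIsScore ev then pvGoB tl
    else (ev :: tl.takeWhile (fun e => ¬ pvIsScore e)) :: pvGoB (tl.dropWhile (fun e => ¬ pvIsScore e))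
termination_by rest.length
decreasing_by
  · simp
  · have := List.length_dropWhile_le (p := fun e => decide ¬ pvIsScore e = true) (l := tl)
    simp at this ⊢; omega

def split_by_score_py_alt (events : List (List (String × String))) : List (List (List (String × String))) :=
  let groups := pvGoB events
  if groups ≠ [] then groups else [events]

-- ===== PRECONDITION & SPEC =====
def Spec_split_by_score_py (events : List (List (String × String))) (out : List (List (List (String × String)))) : Prop := out = split_by_score_py_alt events
instance (events : List (List (String × String))) (out : List (List (List (String × String)))) : Decidable (Spec_split_by_score_py events out) := by unfold Spec_split_by_score_py; infer_instance

-- ===== CLAIM (what is proved, stated in full; the proofs are below) =====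
def Claim_equal_split_by_score_py : Prop := ∀ (events : List (List (String × String))), Dom_split_by_score_py events → Spec_split_by_score_py events (split_by_score_py events)

-- ===== LEMMAS AND PROOFS =====

-- segs c evs: the groups A will still emit given pending cur = c and remaining events evs
def pvSegs (c : List (List (String × String))) (evs : List (List (String × String))) :
    List (List (List (String × String))) :=
  match evs with
  | [] => if c ≠ [] then [c] else []
  | ev :: tl => if pvIsScore ev then (if c ≠ [] then c :: pvSegs [] tl else pvSegs [] tl)
                else pvSegs (c ++ [ev]) tl

-- pvSegs with empty pending cur is exactly B's greedy segmentation (joint strong induction)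
theorem pvSegs_spec (n : Nat) : ∀ (evs : List (List (String × String))), evs.length ≤ n →
    pvSegs [] evs = pvGoB evs ∧
    ∀ (c : List (List (String × String))), c ≠ [] →
      pvSegs c evs = (c ++ evs.takeWhile (fun e => ¬ pvIsScore e)) ::
        pvGoB (evs.dropWhile (fun e => ¬ pvIsScore e)) := by
  induction n with
  | zero =>
    intro evs h
    have : evs = [] := List.eq_nil_of_length_eq_zero (Nat.le_zero.mp h)
    subst this
    exact ⟨by simp [pvSegs, pvGoB], fun c hc => by simp [pvSegs, pvGoB, hc]⟩
  | succ n ih =>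
    intro evs h
    match evs with
    | [] => exact ⟨by simp [pvSegs, pvGoB], fun c hc => by simp [pvSegs, pvGoB, hc]⟩
    | ev :: tl =>
      have htl : tl.length ≤ n := by simp at h; omega
      obtain ⟨ih1, ih2⟩ := ih tl htl
      by_cases hs : pvIsScore ev
      · refine ⟨by simp [pvSegs, pvGoB, hs, ih1], fun c hc => ?_⟩
        simp [pvSegs, pvGoB, hs, hc, List.takeWhile, List.dropWhile, ih1]
      · constructor
        · have := ih2 [ev] (by simp)
          simp only [pvSegs, hs, List.nil_append, pvGoB, Bool.false_eq_true,
            if_false] at this ⊢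
          rw [this]; simp
        · intro c hc
          have := ih2 (c ++ [ev]) (by simp)
          simp only [pvSegs, hs, Bool.false_eq_true, if_false] at this ⊢
          rw [this]; simp [List.takeWhile, List.dropWhile, hs]

-- A's fold, flushed, equals the pending groups g ++ pvSegs c evs
theorem pvFold_flush (evs : List (List (String × String))) :
    ∀ (g : List (List (List (String × String)))) (c : List (List (String × String))),
    (if (evs.foldl pvStepA (g, c)).2 ≠ [] then
        (evs.foldl pvStepA (g, c)).1 ++ [(evs.foldl pvStepA (g, c)).2]
      else (evs.foldl pvStepA (g, c)).1) = g ++ pvSegs c evs := by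
  induction evs with
  | nil => intro g c; by_cases hc : c = [] <;> simp [pvSegs, hc]
  | cons ev tl ih =>
    intro g c
    by_cases hs : pvIsScore ev
    · by_cases hc : c = [] <;>
        simp [List.foldl_cons, pvStepA, hs, hc, pvSegs, ih]
    · simp [List.foldl_cons, pvStepA, hs, pvSegs, ih]

-- ===== VERDICT (by name: the statement is the Claim_ definition above) =====
theorem split_by_score_py_spec : Claim_equal_split_by_score_py := by
  intro events _
  show split_by_score_py events = split_by_score_py_alt events
  have h := pvFold_flush events [] []
  have h0 := (pvSegs_spec events.length events (Nat.le_refl _)).1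
  simp only [split_by_score_py, split_by_score_py_alt, h, h0, List.nil_append]
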